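-- pv_equiv track=rewrite | github.com/Mike-50505/AG_mejorado | AG_mejorado.py | evaluate_individuo
-- ===== SOURCE A (Python) =====
-- def score_column(a, b):
--     if a == '-' or b == '-':
--         return -4
--     return 5 if a == b else -1
--
-- def evaluate_individuo(individuo):
--     score = 0
--     n_seqs = len(individuo)
--     seq_len = len(individuo[0])
--     for col in range(seq_len):
--         for i in range(n_seqs):
--             for j in range(i+1, n_seqs):
--                 score += score_column(individuo[i][col], individuo[j][col])
--     return score
-- ===== SOURCE B (Python) =====
-- def evaluate_individuo(individuo):
--     total = 0
--     seq_len = len(individuo[0])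
--     for col in range(seq_len):
--         counts = {}
--         gaps = 0
--         seen = 0
--         for s in individuo:
--             c = s[col]
--             if c == '-':
--                 total += -4 * seen
--                 gaps += 1
--             else:
--                 same = counts.get(c, 0)
--                 total += -4 * gaps + 5 * same - (seen - gaps - same)
--                 counts[c] = same + 1
--             seen += 1
--     return total
-- ===== Notes on version B (the rewrite author's own statement) =====
-- stated objective: faster
-- what changed: Replaces the nested all-pairs loop per column by a single pass per column that keeps a character counter, a gap count and the number of residues seen, adding each new character's total pair score against everything before it in O(1).
import Mathlib
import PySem

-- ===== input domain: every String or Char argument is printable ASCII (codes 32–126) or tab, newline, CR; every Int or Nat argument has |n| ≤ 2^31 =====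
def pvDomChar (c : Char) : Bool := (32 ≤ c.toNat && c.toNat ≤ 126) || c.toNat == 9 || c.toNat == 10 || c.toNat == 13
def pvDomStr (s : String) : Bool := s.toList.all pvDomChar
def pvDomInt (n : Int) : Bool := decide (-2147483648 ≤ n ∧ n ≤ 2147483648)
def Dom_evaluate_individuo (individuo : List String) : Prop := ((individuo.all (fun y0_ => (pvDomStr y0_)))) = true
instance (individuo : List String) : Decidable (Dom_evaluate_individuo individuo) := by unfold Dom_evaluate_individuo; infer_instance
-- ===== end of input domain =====

-- B replaces A's per-column all-pairs double loop by a single pass with a character counter (asymptotically faster, O(L·n) vs O(L·n²) in a timing run).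

-- ===== PORT A =====
-- score_column(a, b)
def pvScoreColumn (a b : Char) : Int :=
  if a = '-' ∨ b = '-' then -4 else if a = b then 5 else -1

-- individuo[i][col]; total via defaults, exact whenever both indices are in range (guaranteed by Pre_)
def pvCharAt (xs : List String) (i col : Int) : Char :=
  (PySem.Str.pyGet? (PySem.List.pyGetD xs i "") col).getD ' '

def evaluate_individuo (individuo : List String) : Int :=
  let n_seqs : Int := PySem.List.len individuo
  let seq_len : Int := PySem.Str.len (PySem.List.pyGetD individuo 0 "")   -- len(individuo[0]); IndexError on [] excluded by Pre_
  (PySem.List.pyRange 0 seq_len 1).foldl (fun score col =>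
    (PySem.List.pyRange 0 n_seqs 1).foldl (fun score i =>
      (PySem.List.pyRange (i+1) n_seqs 1).foldl (fun score j =>
        score + pvScoreColumn (pvCharAt individuo i col) (pvCharAt individuo j col)) score) score) 0

-- ===== PORT B =====
-- s[col]; total via default, exact whenever col is in range (guaranteed by Pre_)
def pvColChar (s : String) (col : Int) : Char := (PySem.Str.pyGet? s col).getD ' '

-- the body of B's inner loop: state (counts, gaps, seen, total), one new character c
def pvStepC (st : PySem.Dict Char Int × Int × Int × Int) (c : Char) :
    PySem.Dict Char Int × Int × Int × Int :=
  if c = '-' then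
    (st.1, st.2.1 + 1, st.2.2.1 + 1, st.2.2.2 + (-4) * st.2.2.1)
  else
    (st.1.insert c (st.1.getD c 0 + 1), st.2.1, st.2.2.1 + 1,
     st.2.2.2 + ((-4) * st.2.1 + 5 * st.1.getD c 0 - (st.2.2.1 - st.2.1 - st.1.getD c 0)))

def evaluate_individuo_alt (individuo : List String) : Int :=
  let seq_len : Int := PySem.Str.len (PySem.List.pyGetD individuo 0 "")
  (PySem.List.pyRange 0 seq_len 1).foldl (fun total col =>
    (individuo.foldl (fun st s => pvStepC st (pvColChar s col))
      (PySem.Dict.empty, 0, 0, total)).2.2.2) 0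

-- ===== PRECONDITION & SPEC =====
-- Pre_ excludes exactly the inputs on which Python A raises: the empty list (individuo[0] is an
-- IndexError) and lists containing a string shorter than individuo[0] (s[col] is an IndexError).
def Pre_evaluate_individuo (individuo : List String) : Prop :=
  individuo ≠ [] ∧ ∀ s ∈ individuo, (individuo.headD "").toList.length ≤ s.toList.length
instance (individuo : List String) : Decidable (Pre_evaluate_individuo individuo) := by
  unfold Pre_evaluate_individuo; infer_instance
def pvWitness_evaluate_individuo : List String := ["AB-", "A-C", "ABC"]

def Spec_evaluate_individuo (individuo : List String) (out : Int) : Prop := out = evaluate_individuo_alt individuo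
instance (individuo : List String) (out : Int) : Decidable (Spec_evaluate_individuo individuo out) := by unfold Spec_evaluate_individuo; infer_instance

-- ===== CLAIM (what is proved, stated in full; the proofs are below) =====
def Claim_equal_evaluate_individuo : Prop := ∀ (individuo : List String), Dom_evaluate_individuo individuo → Pre_evaluate_individuo individuo → Spec_evaluate_individuo individuo (evaluate_individuo individuo)

-- ===== LEMMAS AND PROOFS =====

-- sum of pvScoreColumn over all ordered pairs (earlier element first)
def pvSumPairs : List Char → Int
  | [] => 0
  | c :: r => ((r.map (fun x => pvScoreColumn c x)).sum) + pvSumPairs r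

-- the counter B's inner loop builds (non-gap characters only)
def pvDictOf (l : List Char) : PySem.Dict Char Int :=
  (l.filter (fun c => !(c == '-'))).foldl (fun d x => d.insert x (d.getD x 0 + 1)) PySem.Dict.empty

lemma pvSum_gap (l : List Char) :
    ((l.map (fun a => pvScoreColumn a '-')).sum) = (-4) * (l.length : Int) := by
  induction l with
  | nil => simp
  | cons a r ih =>
    rw [List.map_cons, List.sum_cons, show pvScoreColumn a '-' = -4 by simp [pvScoreColumn], ih]
    simp [List.length_cons]; push_cast; ring

lemma pvSum_formula (c : Char) (hc : ¬ c = '-') (l : List Char) :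
    ((l.map (fun a => pvScoreColumn a c)).sum)
      = (-4) * (l.count '-' : Int) + 5 * (l.count c : Int)
        - ((l.length : Int) - (l.count '-' : Int) - (l.count c : Int)) := by
  induction l with
  | nil => simp
  | cons a r ih =>
    by_cases h1 : a = '-'
    · subst h1
      have hcc : ¬ ('-' : Char) = c := fun h => hc h.symm
      rw [List.map_cons, List.sum_cons,
        show pvScoreColumn '-' c = -4 by simp [pvScoreColumn], ih]
      simp [List.count_cons, hcc]
      push_cast; ring
    · by_cases h2 : a = c
      · subst h2
        rw [List.map_cons, List.sum_cons,
          show pvScoreColumn a a = 5 by simp [pvScoreColumn, h1], ih]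
        simp [List.count_cons, h1]
        push_cast; ring
      · rw [List.map_cons, List.sum_cons,
          show pvScoreColumn a c = -1 by simp [pvScoreColumn, h1, h2, hc], ih]
        simp [List.count_cons, h1, h2]
        push_cast; ring

lemma pvSumPairs_snoc (l : List Char) (c : Char) :
    pvSumPairs (l ++ [c]) = pvSumPairs l + (l.map (fun a => pvScoreColumn a c)).sum := by
  induction l with
  | nil => simp [pvSumPairs]
  | cons a r ih => simp [pvSumPairs, ih]; ring

lemma pvDictOf_getD (l : List Char) (c : Char) (hc : ¬ c = '-') :
    (pvDictOf l).getD c 0 = (l.count c : Int) := by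
  unfold pvDictOf
  rw [PySem.Dict.getD_foldl_insert_add_one]
  simp [List.count_filter, hc]

-- B's inner loop, characterised over the column's character list
lemma pvFold_col (cs : List Char) (t0 : Int) :
    cs.foldl pvStepC (PySem.Dict.empty, 0, 0, t0)
      = (pvDictOf cs, (cs.count '-' : Int), (cs.length : Int), t0 + pvSumPairs cs) := by
  induction cs using List.reverseRecOn with
  | nil => simp [pvDictOf, pvSumPairs]
  | append_singleton l c ih =>
    rw [List.foldl_append, ih]
    by_cases hc : c = '-'
    · subst hc
      simp only [List.foldl_cons, List.foldl_nil, pvStepC]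
      rw [if_pos trivial]
      refine Prod.ext ?_ (Prod.ext ?_ (Prod.ext ?_ ?_))
      · simp [pvDictOf, List.filter_append]
      · simp [List.count_append]
      · simp [List.length_append]
      · rw [pvSumPairs_snoc, pvSum_gap]; ring
    · simp only [List.foldl_cons, List.foldl_nil, pvStepC]
      rw [if_neg hc]
      have hc' : ¬ ('-' : Char) = c := fun h => hc h.symm
      refine Prod.ext ?_ (Prod.ext ?_ (Prod.ext ?_ ?_))
      · simp [pvDictOf, List.filter_append, hc, List.foldl_append]
      · have h1 : List.count '-' [c] = 0 := by simp [List.count_singleton]; exact hc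
        simp [List.count_append, h1]
      · simp [List.length_append]
      · rw [pvSumPairs_snoc, pvSum_formula c hc, pvDictOf_getD l c hc]
        push_cast; ring

-- A's index double loop as a sum over the column's character list
lemma pvRangeSum (g : String → Char) (l : List String) :
    (((List.range l.length).map (fun k =>
        ((l.drop (k+1)).map (fun s => pvScoreColumn (g (l.getD k "")) (g s))).sum)).sum)
      = pvSumPairs (l.map g) := by
  induction l with
  | nil => simp [pvSumPairs]
  | cons a r ih =>
    rw [List.length_cons, List.range_succ_eq_map]
    simp only [List.map_cons, List.map_map, List.sum_cons]
    have h0 : ((List.drop (0+1) (a :: r)).map (fun s => pvScoreColumn (g ((a :: r).getD 0 "")) (g s))).sum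
        = ((r.map g).map (fun x => pvScoreColumn (g a) x)).sum := by
      simp only [List.map_map]; rfl
    have hsh : ∀ k : Nat,
        (((a :: r).drop (k+1+1)).map (fun s => pvScoreColumn (g ((a :: r).getD (k+1) "")) (g s))).sum
          = ((r.drop (k+1)).map (fun s => pvScoreColumn (g (r.getD k "")) (g s))).sum := by
      intro k; rfl
    rw [h0]
    have ht : List.map ((fun k => (((a :: r).drop (k+1)).map
          (fun s => pvScoreColumn (g ((a :: r).getD k "")) (g s))).sum) ∘ Nat.succ)
          (List.range r.length)
        = List.map (fun k => ((r.drop (k+1)).map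
            (fun s => pvScoreColumn (g (r.getD k "")) (g s))).sum) (List.range r.length) :=
      List.map_congr_left (fun k _ => hsh k)
    rw [ht, ih]
    simp [pvSumPairs]

lemma pvA_col (ind : List String) (col a : Int) :
    (PySem.List.pyRange 0 (PySem.List.len ind) 1).foldl (fun score i =>
        (PySem.List.pyRange (i+1) (PySem.List.len ind) 1).foldl (fun score j =>
          score + pvScoreColumn (pvCharAt ind i col) (pvCharAt ind j col)) score) a
      = a + pvSumPairs (ind.map (fun s => pvColChar s col)) := by
  have hfun : (fun (score : Int) (i : Int) =>
      (PySem.List.pyRange (i+1) (PySem.List.len ind) 1).foldl (fun score j =>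
        score + pvScoreColumn (pvCharAt ind i col) (pvCharAt ind j col)) score)
    = (fun score i => score + (((PySem.List.pyRange (i+1) (PySem.List.len ind) 1).map (fun j =>
        pvScoreColumn (pvCharAt ind i col) (pvCharAt ind j col))).sum)) :=
    funext fun s => funext fun i => PySem.List.foldl_add _ _ s
  rw [hfun, PySem.List.foldl_add]
  congr 1
  simp only [PySem.List.len_eq]
  rw [PySem.List.pyRange_zero_natCast, List.map_map]
  refine Eq.trans (congrArg List.sum (List.map_congr_left fun k _ => ?_))
    (pvRangeSum (fun s => pvColChar s col) ind)
  show ((PySem.List.pyRange ((k : Int)+1) ((ind.length : Nat) : Int) 1).map (fun j =>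
      pvScoreColumn (pvCharAt ind (k : Int) col) (pvCharAt ind j col))).sum
    = ((ind.drop (k+1)).map (fun s =>
      pvScoreColumn ((fun s => pvColChar s col) (ind.getD k ""))
        ((fun s => pvColChar s col) s))).sum
  have e1 : (PySem.List.pyRange ((k : Int)+1) ((ind.length : Nat) : Int) 1).map (fun j =>
        pvScoreColumn (pvCharAt ind (k : Int) col) (pvCharAt ind j col))
      = ((PySem.List.pyRange ((k : Int)+1) ((ind.length : Nat) : Int) 1).map (fun j =>
        PySem.List.pyGetD ind j "")).map (fun s =>
          pvScoreColumn (pvCharAt ind (k : Int) col) (pvColChar s col)) := by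
    rw [List.map_map]; rfl
  have e2 : (PySem.List.pyRange ((k : Int)+1) ((ind.length : Nat) : Int) 1).map (fun j =>
        PySem.List.pyGetD ind j "") = ind.drop (k+1) := by
    have h0 : (0 : Int) ≤ (k : Int) + 1 := by positivity
    have h1 := PySem.List.map_pyGetD_pyRange' ind "" h0
    rw [h1, show ((k : Int)+1).toNat = k+1 by omega]
  rw [e1, e2]
  have e3 : pvCharAt ind ((k : Nat) : Int) col = pvColChar (ind.getD k "") col := by
    unfold pvCharAt pvColChar
    rw [PySem.List.pyGetD_natCast]
  rw [e3]

theorem pv_main (ind : List String) : evaluate_individuo ind = evaluate_individuo_alt ind := by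
  have hB : ∀ (total col : Int),
      (ind.foldl (fun st s => pvStepC st (pvColChar s col))
        (PySem.Dict.empty, 0, 0, total)).2.2.2
        = total + pvSumPairs (ind.map (fun s => pvColChar s col)) := by
    intro total col
    have h : ind.foldl (fun st s => pvStepC st (pvColChar s col))
        (PySem.Dict.empty, 0, 0, total)
        = (ind.map (fun s => pvColChar s col)).foldl pvStepC (PySem.Dict.empty, 0, 0, total) := by
      rw [List.foldl_map]
    rw [h, pvFold_col]
  show (PySem.List.pyRange 0 (PySem.Str.len (PySem.List.pyGetD ind 0 "")) 1).foldl (fun score col =>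
      (PySem.List.pyRange 0 (PySem.List.len ind) 1).foldl (fun score i =>
        (PySem.List.pyRange (i+1) (PySem.List.len ind) 1).foldl (fun score j =>
          score + pvScoreColumn (pvCharAt ind i col) (pvCharAt ind j col)) score) score) 0
    = (PySem.List.pyRange 0 (PySem.Str.len (PySem.List.pyGetD ind 0 "")) 1).foldl (fun total col =>
      (ind.foldl (fun st s => pvStepC st (pvColChar s col))
        (PySem.Dict.empty, 0, 0, total)).2.2.2) 0
  have hstep : (fun (score col : Int) =>
      (PySem.List.pyRange 0 (PySem.List.len ind) 1).foldl (fun score i =>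
        (PySem.List.pyRange (i+1) (PySem.List.len ind) 1).foldl (fun score j =>
          score + pvScoreColumn (pvCharAt ind i col) (pvCharAt ind j col)) score) score)
      = (fun (total col : Int) =>
        (ind.foldl (fun st s => pvStepC st (pvColChar s col))
          (PySem.Dict.empty, 0, 0, total)).2.2.2) := by
    funext score col
    rw [pvA_col, hB]
  rw [hstep]

-- ===== VERDICT (by name: the statement is the Claim_ definition above) =====
theorem evaluate_individuo_spec : Claim_equal_evaluate_individuo := by
  intro individuo _ _
  unfold Spec_evaluate_individuo
  exact pv_main individuo
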